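-- pv_equiv track=rewrite | github.com/lompolo/OhjelmoinninAlkeet | kiva_koodata.py | etsi_indeksit
-- ===== SOURCE A (Python) =====
-- def etsi_indeksit(sarja, minimi, maximi):
--     """
--     Etsii annetusta numeerista dataa sisältävästä listasta alku- ja päätepisteet
--     siten, että alueen arvot ovat annettujen minimi- ja maksimiarvojen välissä.
--     Palauttaa näiden pisteiden indeksit.
--     """
--     try:
--         min_index = next(k for k in reversed(range(len(sarja))) if sarja[k] < minimi) + 1
--     except StopIteration:
--         min_index = 0
--
--     try:
--         max_index = next(k for k in reversed(range(len(sarja))) if sarja[k] <= maximi) + 1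
--     except StopIteration:
--         max_index = 0
--
--     return min_index, max_index
-- ===== SOURCE B (Python) =====
-- def etsi_indeksit(sarja, minimi, maximi):
--     """
--     Etsii annetusta numeerista dataa sisaltavasta listasta alku- ja paatepisteet
--     siten, etta alueen arvot ovat annettujen minimi- ja maksimiarvojen valissa.
--     Palauttaa naiden pisteiden indeksit.
--     """
--     min_index = 0
--     max_index = 0
--     for i, x in enumerate(sarja):
--         if x < minimi:
--             min_index = i + 1
--         if x <= maximi:
--             max_index = i + 1
--     return min_index, max_index
-- ===== Notes on version B (the rewrite author's own statement) =====
-- stated objective: simpler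
-- what changed: A runs two separate backwards generator scans with StopIteration handling; B makes a single forward pass over enumerate(sarja), tracking both boundary indices in one loop with no exceptions.
import Mathlib
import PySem

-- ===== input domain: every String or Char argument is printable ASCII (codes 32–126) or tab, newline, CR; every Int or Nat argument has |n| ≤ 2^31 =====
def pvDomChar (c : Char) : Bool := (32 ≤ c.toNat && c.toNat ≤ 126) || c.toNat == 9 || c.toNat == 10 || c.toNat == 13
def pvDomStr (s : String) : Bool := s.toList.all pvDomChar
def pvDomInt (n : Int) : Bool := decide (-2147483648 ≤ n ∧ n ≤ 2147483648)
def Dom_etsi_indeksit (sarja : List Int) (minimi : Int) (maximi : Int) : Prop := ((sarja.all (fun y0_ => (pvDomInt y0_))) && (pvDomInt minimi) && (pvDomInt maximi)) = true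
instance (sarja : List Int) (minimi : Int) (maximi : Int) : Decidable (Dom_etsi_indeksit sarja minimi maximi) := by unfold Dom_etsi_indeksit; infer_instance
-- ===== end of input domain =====

-- B replaces A's two backwards generator scans (with StopIteration handling) by one
-- forward pass tracking both boundary indices; same O(n) cost, simpler structure.

-- ===== PORT A =====
-- A: for each bound, scan k over reversed(range(len(sarja))) for the first k whose
-- element fails the bound, return k+1; StopIteration (no such k) gives 0.
def etsi_indeksit (sarja : List Int) (minimi : Int) (maximi : Int) : Int × Int :=
  let min_index : Int :=
    match (List.range sarja.length).reverse.find? (fun k => sarja.getD k 0 < minimi) with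
    | some k => (k : Int) + 1
    | none => 0
  let max_index : Int :=
    match (List.range sarja.length).reverse.find? (fun k => sarja.getD k 0 ≤ maximi) with
    | some k => (k : Int) + 1
    | none => 0
  (min_index, max_index)

-- ===== PORT B =====
-- B: one forward pass over enumerate(sarja), updating both indices.
def etsi_indeksit_alt (sarja : List Int) (minimi : Int) (maximi : Int) : Int × Int :=
  (PySem.List.enumerate sarja).foldl
    (fun st q =>
      (if q.2 < minimi then q.1 + 1 else st.1,
       if q.2 ≤ maximi then q.1 + 1 else st.2))
    (0, 0)

-- ===== PRECONDITION & SPEC =====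
def Spec_etsi_indeksit (sarja : List Int) (minimi : Int) (maximi : Int) (out : Int × Int) : Prop := out = etsi_indeksit_alt sarja minimi maximi
instance (sarja : List Int) (minimi : Int) (maximi : Int) (out : Int × Int) : Decidable (Spec_etsi_indeksit sarja minimi maximi out) := by unfold Spec_etsi_indeksit; infer_instance

-- ===== CLAIM (what is proved, stated in full; the proofs are below) =====
def Claim_equal_etsi_indeksit : Prop := ∀ (sarja : List Int) (minimi : Int) (maximi : Int), Dom_etsi_indeksit sarja minimi maximi → Spec_etsi_indeksit sarja minimi maximi (etsi_indeksit sarja minimi maximi)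

-- ===== LEMMAS AND PROOFS =====

-- A foldl with a componentwise pair step splits into two foldls.
theorem pv_foldl_pair_split {α β γ : Type} (f : β → α → β) (g : γ → α → γ)
    (l : List α) (a : β) (b : γ) :
    l.foldl (fun st q => (f st.1 q, g st.2 q)) (a, b) =
      (l.foldl f a, l.foldl g b) := by
  induction l generalizing a b with
  | nil => rfl
  | cons x xs ih => simp [List.foldl, ih]

-- find? only depends on the predicate's values on members.
theorem pv_find?_congr_mem {α : Type} (p q : α → Bool) (l : List α)
    (h : ∀ a ∈ l, p a = q a) : l.find? p = l.find? q := by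
  induction l with
  | nil => rfl
  | cons x xs ih =>
    simp only [List.find?]
    rw [h x (by simp)]
    cases q x with
    | true => rfl
    | false => exact ih (fun a ha => h a (by simp [ha]))

-- The forward pass tracking "last index satisfying p, plus 1" equals A's
-- backwards search for the first failing index.
theorem pv_last_hit (p : Int → Prop) [DecidablePred p] (l : List Int) :
    (PySem.List.enumerate l).foldl (fun acc q => if p q.2 then q.1 + 1 else acc) 0 =
      match (List.range l.length).reverse.find? (fun k => decide (p (l.getD k 0))) with
      | some k => (k : Int) + 1
      | none => 0 := by
  induction l using List.reverseRecOn with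
  | nil => rfl
  | append_singleton xs x ih =>
    rw [PySem.List.enumerate_append, List.foldl_append]
    simp only [PySem.List.enumerate_cons, PySem.List.enumerate_nil, List.foldl]
    rw [List.length_append, List.length_singleton, List.range_succ, List.reverse_append]
    simp only [List.reverse_singleton, List.singleton_append, List.find?]
    have hget : (xs ++ [x]).getD xs.length 0 = x := by
      simp [List.getD]
    rw [hget]
    have hcong : (List.range xs.length).reverse.find?
        (fun k => decide (p ((xs ++ [x]).getD k 0))) =
        (List.range xs.length).reverse.find? (fun k => decide (p (xs.getD k 0))) := by
      apply pv_find?_congr_mem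
      intro k hk
      have hk' : k < xs.length := List.mem_range.mp (List.mem_reverse.mp hk)
      simp [List.getD, List.getElem?_append_left hk']
    by_cases hpx : p x
    · simp [hpx]
    · simp only [hpx, decide_false, hcong, ← ih]
      simp

theorem pv_etsi_eq (sarja : List Int) (minimi maximi : Int) :
    etsi_indeksit sarja minimi maximi = etsi_indeksit_alt sarja minimi maximi := by
  unfold etsi_indeksit etsi_indeksit_alt
  rw [pv_foldl_pair_split
      (fun a (q : Int × Int) => if q.2 < minimi then q.1 + 1 else a)
      (fun b (q : Int × Int) => if q.2 ≤ maximi then q.1 + 1 else b)]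
  exact Prod.ext (pv_last_hit (· < minimi) sarja).symm
    (pv_last_hit (· ≤ maximi) sarja).symm

-- ===== VERDICT (by name: the statement is the Claim_ definition above) =====
theorem etsi_indeksit_spec : Claim_equal_etsi_indeksit := by
  intro sarja minimi maximi _
  exact pv_etsi_eq sarja minimi maximi
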